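-- pv_equiv track=rewrite | github.com/cartesiosson/ai_act_project | forensic_agent/app/services/sparql_queries.py | _determine_risk_from_inputs
-- ===== SOURCE A (Python) =====
-- from typing import Dict, List, Optional, Tuple
--
-- def _determine_risk_from_inputs(
--
--     purpose: str,
--     contexts: List[str],
--     data_types: List[str]
-- ) -> str:
--     """
--     Determine EU AI Act risk level based on input keywords.
--     This is a fallback when the ontology doesn't have matching data.
--
--     Based on EU AI Act Article 6 and Annex III high-risk categories.
--     """
--     # Combine all inputs for keyword matching
--     all_text = " ".join([
--         purpose or "",
--         " ".join(contexts or []),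
--         " ".join(data_types or [])
--     ]).lower()
--
--     # PROHIBITED (Unacceptable Risk) - Article 5
--     prohibited_keywords = [
--         "social scoring", "socialscoring", "social credit",
--         "subliminal", "manipulation", "exploit vulnerability",
--         "predictive policing", "predictivepolicing",
--         "mass surveillance", "real-time remote biometric"
--     ]
--     for keyword in prohibited_keywords:
--         if keyword in all_text:
--             return "Unacceptable"
--
--     # HIGH RISK - Annex III categories
--     high_risk_keywords = [
--         # Biometric identification
--         "biometric", "facial recognition", "face recognition",
--         "fingerprint", "iris scan", "voice recognition",
--         # Law enforcement
--         "law enforcement", "lawenforcement", "police", "criminal",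
--         "border", "migration", "asylum",
--         # Critical infrastructure
--         "critical infrastructure", "criticalinfrastructure",
--         "energy", "water supply", "transport",
--         "autonomous", "self-driving", "autonomous vehicle",
--         # Education and employment
--         "education", "student", "recruitment", "employment",
--         "hiring", "worker", "performance evaluation",
--         # Healthcare - Annex III, point 5(a): medical devices
--         "healthcare", "health care", "medical", "diagnosis",
--         "clinical", "patient", "therapeutic", "health",
--         # Essential services
--         "credit scoring", "creditscoring", "insurance",
--         "social benefit", "emergency services",
--         # Justice and democracy
--         "court", "judicial", "election", "voting"
--     ]
--     for keyword in high_risk_keywords: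
--         if keyword in all_text:
--             return "HighRisk"
--
--     # LIMITED RISK - Article 52 transparency obligations
--     limited_risk_keywords = [
--         "chatbot", "emotion recognition", "emotionrecognition",
--         "deepfake", "synthetic", "generated content",
--         "virtual assistant", "conversational"
--     ]
--     for keyword in limited_risk_keywords:
--         if keyword in all_text:
--             return "LimitedRisk"
--
--     # Default to Minimal Risk
--     return "MinimalRisk"
-- ===== SOURCE B (Python) =====
-- _PROHIBITED = [
--     "social scoring", "socialscoring", "social credit",
--     "subliminal", "manipulation", "exploit vulnerability",
--     "predictive policing", "predictivepolicing",
--     "mass surveillance", "real-time remote biometric"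
-- ]
--
-- _HIGH_RISK = [
--     "biometric", "facial recognition", "face recognition",
--     "fingerprint", "iris scan", "voice recognition",
--     "law enforcement", "lawenforcement", "police", "criminal",
--     "border", "migration", "asylum",
--     "critical infrastructure", "criticalinfrastructure",
--     "energy", "water supply", "transport",
--     "autonomous", "self-driving", "autonomous vehicle",
--     "education", "student", "recruitment", "employment",
--     "hiring", "worker", "performance evaluation",
--     "healthcare", "health care", "medical", "diagnosis",
--     "clinical", "patient", "therapeutic", "health",
--     "credit scoring", "creditscoring", "insurance",
--     "social benefit", "emergency services",
--     "court", "judicial", "election", "voting"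
-- ]
--
-- _LIMITED_RISK = [
--     "chatbot", "emotion recognition", "emotionrecognition",
--     "deepfake", "synthetic", "generated content",
--     "virtual assistant", "conversational"
-- ]
--
-- # One keyword table: each keyword carries a numeric severity priority.
-- _KEYWORD_TABLE = (
--     [(k, 3) for k in _PROHIBITED]
--     + [(k, 2) for k in _HIGH_RISK]
--     + [(k, 1) for k in _LIMITED_RISK]
-- )
--
-- _LABELS = ["MinimalRisk", "LimitedRisk", "HighRisk", "Unacceptable"]
--
--
-- def _determine_risk_from_inputs(purpose, contexts, data_types):
--     """Single pass over a (keyword, priority) table; return the label of the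
--     highest-priority keyword found as a substring."""
--     all_text = " ".join([
--         purpose or "",
--         " ".join(contexts or []),
--         " ".join(data_types or [])
--     ]).lower()
--     best = 0
--     for keyword, prio in _KEYWORD_TABLE:
--         if prio > best and keyword in all_text:
--             best = prio
--     return _LABELS[best]
-- ===== Notes on version B (the rewrite author's own statement) =====
-- stated objective: alternative
-- what changed: A's three sequential early-return scans over separate keyword lists are replaced by a single fold over one (keyword, priority) table that keeps the highest priority whose keyword occurs as a substring, then indexes a label array.
import Mathlib
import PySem

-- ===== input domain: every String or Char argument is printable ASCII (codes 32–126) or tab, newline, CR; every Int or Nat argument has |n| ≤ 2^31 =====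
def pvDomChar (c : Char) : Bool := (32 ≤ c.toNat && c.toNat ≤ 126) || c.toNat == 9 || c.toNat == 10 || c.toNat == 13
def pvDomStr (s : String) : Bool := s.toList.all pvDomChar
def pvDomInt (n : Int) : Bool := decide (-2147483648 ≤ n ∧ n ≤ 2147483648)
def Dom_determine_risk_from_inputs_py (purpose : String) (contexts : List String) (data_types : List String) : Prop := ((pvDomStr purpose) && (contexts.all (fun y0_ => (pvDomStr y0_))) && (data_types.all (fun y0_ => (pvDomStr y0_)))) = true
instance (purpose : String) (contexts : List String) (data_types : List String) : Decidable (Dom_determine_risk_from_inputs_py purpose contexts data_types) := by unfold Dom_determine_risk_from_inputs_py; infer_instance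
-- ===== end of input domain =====

-- B replaces A's three sequential early-return keyword scans with one pass over a
-- single (keyword, priority) table that keeps the highest priority seen (objective: alternative decomposition).

-- The three keyword lists (identical literals in Source A and Source B; shared here as data).
def pvProhibited : List String :=
  ["social scoring", "socialscoring", "social credit",
   "subliminal", "manipulation", "exploit vulnerability",
   "predictive policing", "predictivepolicing",
   "mass surveillance", "real-time remote biometric"]

def pvHighRisk : List String :=
  ["biometric", "facial recognition", "face recognition",
   "fingerprint", "iris scan", "voice recognition",
   "law enforcement", "lawenforcement", "police", "criminal",
   "border", "migration", "asylum",
   "critical infrastructure", "criticalinfrastructure",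
   "energy", "water supply", "transport",
   "autonomous", "self-driving", "autonomous vehicle",
   "education", "student", "recruitment", "employment",
   "hiring", "worker", "performance evaluation",
   "healthcare", "health care", "medical", "diagnosis",
   "clinical", "patient", "therapeutic", "health",
   "credit scoring", "creditscoring", "insurance",
   "social benefit", "emergency services",
   "court", "judicial", "election", "voting"]

def pvLimitedRisk : List String :=
  ["chatbot", "emotion recognition", "emotionrecognition",
   "deepfake", "synthetic", "generated content",
   "virtual assistant", "conversational"]

-- 'purpose or ""' / 'contexts or []' (Python truthiness on str / list)
def pvOrEmptyStr (s : String) : String := if s = "" then "" else s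
def pvOrEmptyList (xs : List String) : List String := if xs = [] then [] else xs

-- all_text = " ".join([purpose or "", " ".join(contexts or []), " ".join(data_types or [])]).lower()
def pvAllText (purpose : String) (contexts : List String) (data_types : List String) : String :=
  PySem.Str.lower (PySem.Str.join " "
    [pvOrEmptyStr purpose,
     PySem.Str.join " " (pvOrEmptyList contexts),
     PySem.Str.join " " (pvOrEmptyList data_types)])

-- ===== PORT A =====
-- 'for keyword in kws: if keyword in all_text: return label' — early return as Option
def pvScan (kws : List String) (t : String) (label : String) : Option String :=
  match kws with
  | [] => none
  | k :: rest => if PySem.Str.isIn k t then some label else pvScan rest t label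

def determine_risk_from_inputs_py (purpose : String) (contexts : List String) (data_types : List String) : String :=
  let all_text := pvAllText purpose contexts data_types
  match pvScan pvProhibited all_text "Unacceptable" with
  | some r => r
  | none =>
    match pvScan pvHighRisk all_text "HighRisk" with
    | some r => r
    | none =>
      match pvScan pvLimitedRisk all_text "LimitedRisk" with
      | some r => r
      | none => "MinimalRisk"

-- ===== PORT B =====
def pvTable : List (String × Int) :=
  pvProhibited.map (fun k => (k, 3)) ++ pvHighRisk.map (fun k => (k, 2))
    ++ pvLimitedRisk.map (fun k => (k, 1))

def pvLabels : List String := ["MinimalRisk", "LimitedRisk", "HighRisk", "Unacceptable"]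

def determine_risk_from_inputs_py_alt (purpose : String) (contexts : List String) (data_types : List String) : String :=
  let all_text := pvAllText purpose contexts data_types
  let best := pvTable.foldl
    (fun best kp => if kp.2 > best ∧ PySem.Str.isIn kp.1 all_text then kp.2 else best) 0
  -- _LABELS[best]; best ∈ {0,1,2,3} so the lookup never fails ('.getD ""' is unreachable)
  (PySem.List.pyGet? pvLabels best).getD ""

-- ===== PRECONDITION & SPEC =====
def Spec_determine_risk_from_inputs_py (purpose : String) (contexts : List String) (data_types : List String) (out : String) : Prop := out = determine_risk_from_inputs_py_alt purpose contexts data_types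
instance (purpose : String) (contexts : List String) (data_types : List String) (out : String) : Decidable (Spec_determine_risk_from_inputs_py purpose contexts data_types out) := by unfold Spec_determine_risk_from_inputs_py; infer_instance

-- ===== CLAIM (what is proved, stated in full; the proofs are below) =====
def Claim_equal_determine_risk_from_inputs_py : Prop := ∀ (purpose : String) (contexts : List String) (data_types : List String), Dom_determine_risk_from_inputs_py purpose contexts data_types → Spec_determine_risk_from_inputs_py purpose contexts data_types (determine_risk_from_inputs_py purpose contexts data_types)

-- ===== LEMMAS AND PROOFS =====

-- A's early-return scan returns the label iff some keyword matches.
theorem pvScan_eq (kws : List String) (t label : String) :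
    pvScan kws t label
      = if kws.any (fun k => PySem.Str.isIn k t) then some label else none := by
  induction kws with
  | nil => rfl
  | cons k rest ih =>
    simp only [pvScan, List.any_cons]
    rcases Bool.eq_false_or_eq_true (PySem.Str.isIn k t) with h | h <;>
      simp only [h, Bool.false_or, Bool.true_or, if_true, Bool.false_eq_true, if_false, ih]

-- B's fold over a constant-priority segment keeps 'best' unless the priority beats it
-- and some keyword of the segment matches.
theorem pvSeg_fold (p : Int) (kws : List String) (t : String) (b : Int) :
    ((kws.map (fun k => (k, p))).foldl
        (fun best kp => if kp.2 > best ∧ PySem.Str.isIn kp.1 t then kp.2 else best) b)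
      = if b < p ∧ kws.any (fun k => PySem.Str.isIn k t) then p else b := by
  induction kws generalizing b with
  | nil => simp
  | cons k rest ih =>
    simp only [List.map_cons, List.foldl_cons, List.any_cons]
    rcases Bool.eq_false_or_eq_true (PySem.Str.isIn k t) with h | h <;> simp only [h]
    · by_cases hb : p > b
      · rw [if_pos ⟨hb, trivial⟩, ih, ite_self, Bool.true_or, if_pos ⟨hb, rfl⟩]
      · rw [if_neg (fun hc => hb hc.1), ih, Bool.true_or, if_neg (fun hc => hb hc.1),
            if_neg (fun hc => hb hc.1)]
    · rw [if_neg (fun hc => Bool.false_ne_true hc.2), ih, Bool.false_or]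

theorem determine_risk_eq (purpose : String) (contexts : List String) (data_types : List String) :
    determine_risk_from_inputs_py purpose contexts data_types
      = determine_risk_from_inputs_py_alt purpose contexts data_types := by
  simp only [determine_risk_from_inputs_py, determine_risk_from_inputs_py_alt, pvTable]
  generalize pvAllText purpose contexts data_types = t
  rw [List.foldl_append, List.foldl_append, pvSeg_fold, pvSeg_fold, pvSeg_fold,
      pvScan_eq, pvScan_eq, pvScan_eq]
  rcases Bool.eq_false_or_eq_true (pvProhibited.any (fun k => PySem.Str.isIn k t)) with h3 | h3 <;>
    rcases Bool.eq_false_or_eq_true (pvHighRisk.any (fun k => PySem.Str.isIn k t)) with h2 | h2 <;>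
      rcases Bool.eq_false_or_eq_true (pvLimitedRisk.any (fun k => PySem.Str.isIn k t)) with h1 | h1 <;>
        simp only [h1, h2, h3] <;> norm_num <;> rfl

-- ===== VERDICT (by name: the statement is the Claim_ definition above) =====
theorem determine_risk_from_inputs_py_spec : Claim_equal_determine_risk_from_inputs_py :=
  fun purpose contexts data_types _ => determine_risk_eq purpose contexts data_types
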